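/- GENERATED by farm/mkstatement.py from design/units.tsv (unit `digest_extensions.COMPOSITION`) and the Specs of Gif/Spec/*.lean — do not edit.
   THE STATEMENT of the proof unit `digest_extensions.COMPOSITION`: the function `digest_extensions` (53 instructions) satisfies its contract,
   GIVEN THE STATEMENTS OF ITS 3 SEGMENTS (`Gif.Spec.digest_extensions.Seg<k> Lay μ u₀`: what the unit `digest_extensions.<k>` proves).
   No machine code is walked: `ReachVia.trans` along the segments (the exit assertion of a segment is the entry assertion of
   its successor), an induction on the loop measures. What the names mean: ProgX/Base/Spec/Basic.lean. The theorem to prove: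
   `theorem digest_extensions_COMPOSITION_ok : Gif.Spec.digest_extensions_COMPOSITION.Statement`. -/
import Gif.Code
import Gif.Dec.All
import Gif.Labels
import Gif.Spec.Driver
import Gif.Spec.Seg_digest_extensions
namespace Gif.Spec.digest_extensions_COMPOSITION
open X86 X86.User Asan

/-- The statement of unit `digest_extensions.COMPOSITION`. -/
def Statement : Prop :=
  ∀ (Lay : Layout) (_hLay : Lay.hi = 0x1000000) (μ : Microarch) (_hμ : UserX.MicroOK μ) (u₀ : State)
    (_h_digest_extensions_1 : Gif.Spec.digest_extensions.Seg1 Lay μ u₀)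
    (_h_digest_extensions_2 : Gif.Spec.digest_extensions.Seg2 Lay μ u₀)
    (_h_digest_extensions_E : Gif.Spec.digest_extensions.SegE Lay μ u₀),
    ∀ (H : Heap) (rest : List Obj) (frames : List (Nat × FrameLayout)) (e : Option Exts), Calls Lay μ ProgX.Base.WayInv (ProgX.Base.conv u₀) Gif.L.digest_extensions.entry (Gif.Spec.digest_extensions.spec H rest frames e)

end Gif.Spec.digest_extensions_COMPOSITION
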